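-- pv_equiv track=rewrite | github.com/JFlo21/Generate-Weekly-PDFs-DSR-Resiliency | cleanup_excels.py | find_latest
-- ===== SOURCE A (Python) =====
-- from typing import Dict, List, Optional, Tuple
--
-- def identify(filename: str) -> Optional[Tuple[str, str]]:
--     if not filename.startswith("WR_") or "_WeekEnding_" not in filename:
--         return None
--     parts = filename.split('_')
--     try:
--         wr = parts[1]
--         week = parts[3]
--     except IndexError:
--         return None
--     return wr, week
--
-- def find_latest(files: List[str]) -> Dict[Tuple[str,str], str]:
--     latest: Dict[Tuple[str,str], str] = {}
--     for f in files:
--         ident = identify(f)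
--         if not ident:
--             continue
--         # lexical comparison works due to timestamp+hash ordering in name
--         if ident not in latest or f > latest[ident]:
--             latest[ident] = f
--     return latest
-- ===== SOURCE B (Python) =====
-- from typing import Dict, List, Optional, Tuple
--
-- def identify(filename: str) -> Optional[Tuple[str, str]]:
--     if not filename.startswith("WR_") or "_WeekEnding_" not in filename:
--         return None
--     parts = filename.split('_')
--     try:
--         wr = parts[1]
--         week = parts[3]
--     except IndexError:
--         return None
--     return wr, week
--
-- def find_latest(files: List[str]) -> Dict[Tuple[str, str], str]:
--     # group-then-aggregate: collect every matching filename per key, then take max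
--     groups: Dict[Tuple[str, str], List[str]] = {}
--     for f in files:
--         ident = identify(f)
--         if ident:
--             groups[ident] = groups.get(ident, []) + [f]
--     return {k: max(v) for k, v in groups.items()}
-- ===== Notes on version B (the rewrite author's own statement) =====
-- stated objective: alternative
-- what changed: B replaces A's streaming conditional-update ('keep the larger filename as you go') by a group-then-aggregate decomposition: one pass collects every matching filename into a per-(wr,week) group dict, then a comprehension takes max over each group.
import Mathlib
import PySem

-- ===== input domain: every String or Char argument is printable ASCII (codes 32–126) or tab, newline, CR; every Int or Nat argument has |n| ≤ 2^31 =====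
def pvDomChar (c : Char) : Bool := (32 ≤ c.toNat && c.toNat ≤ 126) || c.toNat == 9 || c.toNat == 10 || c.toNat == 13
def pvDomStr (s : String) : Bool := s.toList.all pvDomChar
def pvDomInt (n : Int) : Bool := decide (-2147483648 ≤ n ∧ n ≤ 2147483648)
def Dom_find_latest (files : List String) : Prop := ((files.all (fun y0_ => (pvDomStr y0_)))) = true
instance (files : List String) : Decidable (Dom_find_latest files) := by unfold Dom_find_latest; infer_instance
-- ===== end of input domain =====

-- B groups matching filenames per (wr, week) key and takes max per group, instead of A's
-- streaming conditional-update; same cost class, objective: alternative decomposition.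


-- ===== PORT A =====
-- helper 'identify' (shared module context; B uses the identical helper)
def identify (filename : String) : Option (String × String) :=
  if ¬ (PySem.Str.startswith filename "WR_" = true) ∨ ¬ (PySem.Str.isIn "_WeekEnding_" filename = true) then
    none
  else
    -- split('_'): sep is nonempty, so split? never returns none
    let parts := (PySem.Str.split? filename "_").getD []
    -- try parts[1]; parts[3] except IndexError: return None
    match PySem.List.pyGet? parts 1, PySem.List.pyGet? parts 3 with
    | some wr, some week => some (wr, week)
    | _, _ => none

def stepA (latest : PySem.Dict (String × String) String) (f : String) :
    PySem.Dict (String × String) String :=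
  match identify f with
  | none => latest
  | some ident =>
    -- 'ident not in latest or f > latest[ident]' (short-circuit: lookup only when present)
    match latest.get? ident with
    | none => latest.insert ident f
    | some cur => if cur < f then latest.insert ident f else latest

def find_latest (files : List String) : List (String × String × String) :=
  (files.foldl stepA PySem.Dict.empty).items.map (fun p => (p.1.1, p.1.2, p.2))

-- ===== PORT B =====
-- max(v) for the (always nonempty) group; default never used
def pymaxStr (l : List String) : String := (PySem.List.max? l (fun x => x)).getD ""

def stepB (groups : PySem.Dict (String × String) (List String)) (f : String) :
    PySem.Dict (String × String) (List String) :=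
  match identify f with
  | none => groups
  | some k => groups.insert k (groups.getD k [] ++ [f])

def find_latest_alt (files : List String) : List (String × String × String) :=
  (files.foldl stepB PySem.Dict.empty).items.map (fun p => (p.1.1, p.1.2, pymaxStr p.2))

-- ===== PRECONDITION & SPEC =====
def Spec_find_latest (files : List String) (out : List (String × String × String)) : Prop := out = find_latest_alt files
instance (files : List String) (out : List (String × String × String)) : Decidable (Spec_find_latest files out) := by unfold Spec_find_latest; infer_instance

-- ===== CLAIM (what is proved, stated in full; the proofs are below) =====
def Claim_equal_find_latest : Prop := ∀ (files : List String), Dom_find_latest files → Spec_find_latest files (find_latest files)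

-- ===== LEMMAS AND PROOFS =====

theorem pymaxStr_cons (x : String) (t : List String) :
    pymaxStr (x :: t) = t.foldl max x := by
  simp [pymaxStr, PySem.List.max?_id_cons]

theorem pymaxStr_append_singleton (l : List String) (hl : l ≠ []) (f : String) :
    pymaxStr (l ++ [f]) = max (pymaxStr l) f := by
  rcases l with _ | ⟨x, t⟩
  · exact absurd rfl hl
  · simp [List.cons_append, pymaxStr_cons, List.foldl_append]

-- get? through a value-mapping of the items list
theorem get?_mk_map {κ ν ω : Type} [BEq κ] (l : List (κ × ν)) (f : ν → ω) (k : κ) :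
    PySem.Dict.get? { items := l.map (fun p => (p.1, f p.2)) } k
      = (PySem.Dict.get? { items := l } k).map f := by
  induction l with
  | nil => simp [PySem.Dict.get?]
  | cons p t ih =>
    obtain ⟨a, b⟩ := p
    simp only [List.map_cons, PySem.Dict.get?_mk_cons]
    by_cases h : a == k
    · simp [h]
    · simp [h, ih]

-- uniqueness of the pair at a key under Nodup keys
theorem snd_eq_of_mem_items {κ ν : Type} [BEq κ] [LawfulBEq κ]
    (g : PySem.Dict κ ν) (hnd : g.keys.Nodup) {k : κ} {v : ν} {p : κ × ν}
    (hget : g.get? k = some v) (hp : p ∈ g.items) (hk : p.1 = k) : p.2 = v := by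
  have h1 : g.get? p.1 = some p.2 :=
    PySem.Dict.get?_of_mem_items g (by simpa using hp) hnd
  rw [hk, hget] at h1
  exact (Option.some.inj h1).symm

-- the loop invariant: A's dict is B's group dict with max taken per value
theorem loop_eq (files : List String)
    (d : PySem.Dict (String × String) String)
    (g : PySem.Dict (String × String) (List String))
    (hnd : g.keys.Nodup)
    (hitems : d.items = g.items.map (fun p => (p.1, pymaxStr p.2)))
    (hne : ∀ p ∈ g.items, p.2 ≠ []) :
    (files.foldl stepA d).items
      = (files.foldl stepB g).items.map (fun p => (p.1, pymaxStr p.2)) := by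
  induction files generalizing d g with
  | nil => simpa using hitems
  | cons f rest ih =>
    simp only [List.foldl_cons]
    have hd : d = PySem.Dict.mk (g.items.map (fun p => (p.1, pymaxStr p.2))) := by
      apply PySem.Dict.ext; simpa using hitems
    have hget : ∀ k, d.get? k = (g.get? k).map pymaxStr := by
      intro k; rw [hd]
      exact get?_mk_map g.items pymaxStr k
    rcases hid : identify f with _ | k
    · simp only [stepA, stepB, hid]
      exact ih d g hnd hitems hne
    · rcases hg : g.get? k with _ | l
      · -- new key: both ports append a fresh entry
        have hda : d.get? k = none := by rw [hget, hg]; rfl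
        have hcg : g.contains k = false := by
          rw [PySem.Dict.contains_eq_isSome_get?, hg]; rfl
        have hcd : d.contains k = false := by
          rw [PySem.Dict.contains_eq_isSome_get?, hda]; rfl
        simp only [stepA, stepB, hid, hda]
        apply ih
        · exact PySem.Dict.nodup_keys_insert _ _ _ hnd
        · rw [PySem.Dict.items_insert_of_not_contains d f hcd,
              PySem.Dict.items_insert_of_not_contains g _ hcg,
              PySem.Dict.getD_of_get?_eq_none g [] hg]
          simp [hitems, pymaxStr_cons]
        · intro p hp
          rcases (PySem.Dict.mem_items_insert _ _ _ _).mp hp with rfl | ⟨hp', _⟩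
          · simp [PySem.Dict.getD_of_get?_eq_none g [] hg]
          · exact hne p hp'
      · -- existing key
        have hlne : l ≠ [] := hne (k, l) (PySem.Dict.mem_items_of_get?_eq_some _ hg)
        have hda : d.get? k = some (pymaxStr l) := by rw [hget, hg]; rfl
        have hcg : g.contains k = true := by
          rw [PySem.Dict.contains_eq_isSome_get?, hg]; rfl
        have hcd : d.contains k = true := by
          rw [PySem.Dict.contains_eq_isSome_get?, hda]; rfl
        have hgD : g.getD k [] = l := PySem.Dict.getD_of_get?_eq_some g [] hg
        have hmax : pymaxStr (l ++ [f]) = max (pymaxStr l) f :=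
          pymaxStr_append_singleton l hlne f
        have hnodupB := PySem.Dict.nodup_keys_insert g k (l ++ [f]) hnd
        have hneB : ∀ p ∈ (g.insert k (l ++ [f])).items, p.2 ≠ [] := by
          intro p hp
          rcases (PySem.Dict.mem_items_insert _ _ _ _).mp hp with rfl | ⟨hp', _⟩
          · simp
          · exact hne p hp'
        -- B's new items under the max-map
        have hBitems :
            ((g.insert k (l ++ [f])).items.map (fun p => (p.1, pymaxStr p.2)))
              = g.items.map (fun p =>
                  if p.1 == k then (k, max (pymaxStr l) f) else (p.1, pymaxStr p.2)) := by
          rw [PySem.Dict.items_insert_of_contains g _ hcg, List.map_map]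
          apply List.map_congr_left
          intro p _
          by_cases h : p.1 == k
          · have hk : p.1 = k := eq_of_beq h
            simp [hk, hmax]
          · have hk : p.1 ≠ k := fun e => h (by simp [e])
            simp [h, hk]
        simp only [stepA, stepB, hid, hda, hgD]
        by_cases hlt : pymaxStr l < f
        · -- A overwrites with f
          simp only [hlt, if_true]
          apply ih _ _ hnodupB _ hneB
          rw [hBitems, PySem.Dict.items_insert_of_contains d f hcd, hitems, List.map_map]
          apply List.map_congr_left
          intro p _
          by_cases h : p.1 == k
          · simp [Function.comp, h, max_eq_right (le_of_lt hlt)]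
          · simp [Function.comp, h]
        · -- A keeps its current max
          simp only [hlt, if_false]
          have hfle : f ≤ pymaxStr l := not_lt.mp hlt
          apply ih _ _ hnodupB _ hneB
          rw [hBitems, hitems]
          apply List.map_congr_left
          intro p hp
          by_cases h : p.1 == k
          · have hk : p.1 = k := eq_of_beq h
            have hpl : p.2 = l := snd_eq_of_mem_items g hnd hg hp hk
            simp [hk, hpl, max_eq_left hfle]
          · simp [h]

-- ===== VERDICT (by name: the statement is the Claim_ definition above) =====
theorem find_latest_spec : Claim_equal_find_latest := by
  intro files _
  unfold Spec_find_latest find_latest find_latest_alt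
  have h := loop_eq files PySem.Dict.empty PySem.Dict.empty
    PySem.Dict.nodup_keys_empty rfl (by intro p hp; simp [PySem.Dict.empty] at hp)
  rw [h, List.map_map]
  rfl
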